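-- pv_equiv track=rewrite | github.com/yorg-cj/deck-of-dragons | src/classify/title.py | _title_for_house
-- ===== SOURCE A (Python) =====
-- def _title_for_house(house: str, is_individual: bool, text: str) -> str:
--     text_lower = text.lower()
--
--     if house == "High House War":
--         if is_individual:
--             # Aggressive commander vs. covert operator
--             return "The Assassin" if any(w in text_lower for w in ("assassin", "covert", "killed", "targeted")) else "The Warlord"
--         return "The Army"
--
--     if house == "High House Coin":
--         if is_individual:
--             return "The Merchant"
--         # Nation imposing vs. institution managing
--         return "The Throne" if any(w in text_lower for w in ("central bank", "federal reserve", "imf", "world bank")) else "The King"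
--
--     if house == "High House Shadow":
--         if is_individual:
--             return "The Assassin"
--         # Weaver = narrative/influence ops; Knight = direct covert action
--         return "The Weaver" if any(w in text_lower for w in ("disinformation", "propaganda", "influence", "narrative")) else "The Knight"
--
--     if house == "High House Life":
--         if is_individual:
--             return "The Magi"   # scientist, doctor, expert
--         return "The King"       # nation or institution driving the event
--
--     if house == "High House Iron":
--         if is_individual:
--             return "The Magi"   # tech visionary, researcher
--         return "The Merchant"   # corporation or industrial entity
--
--     if house == "High House Words":
--         if is_individual:
--             return "The Herald"  # spokesperson, journalist, diplomat
--         return "The Weaver"      # media org, state broadcaster, platform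
--
--     if house == "High House Chains":
--         if is_individual:
--             return "The Assassin"  # enforcer, debt collector, warden
--         return "The Knight"        # occupying force, binding institution
--
--     return "The Throne"  # fallback
-- ===== SOURCE B (Python) =====
-- # Rule-engine re-implementation: a flat ordered rule list scanned first-match-wins,
-- # with the keyword condition folded into rule matching; no per-house branching.
--
-- _RULES = (
--     # (house, is_individual, any-of-these-keywords (None = unconditional), title)
--     ("High House War", True, ("assassin", "covert", "killed", "targeted"), "The Assassin"),
--     ("High House War", True, None, "The Warlord"),
--     ("High House War", False, None, "The Army"),
--     ("High House Coin", True, None, "The Merchant"),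
--     ("High House Coin", False, ("central bank", "federal reserve", "imf", "world bank"), "The Throne"),
--     ("High House Coin", False, None, "The King"),
--     ("High House Shadow", True, None, "The Assassin"),
--     ("High House Shadow", False, ("disinformation", "propaganda", "influence", "narrative"), "The Weaver"),
--     ("High House Shadow", False, None, "The Knight"),
--     ("High House Life", True, None, "The Magi"),
--     ("High House Life", False, None, "The King"),
--     ("High House Iron", True, None, "The Magi"),
--     ("High House Iron", False, None, "The Merchant"),
--     ("High House Words", True, None, "The Herald"),
--     ("High House Words", False, None, "The Weaver"),
--     ("High House Chains", True, None, "The Assassin"),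
--     ("High House Chains", False, None, "The Knight"),
-- )
--
--
-- def _title_for_house(house: str, is_individual: bool, text: str) -> str:
--     text_lower = text.lower()
--     for rule_house, rule_flag, keywords, title in _RULES:
--         if (rule_house == house and rule_flag == is_individual
--                 and (keywords is None or any(w in text_lower for w in keywords))):
--             return title
--     return "The Throne"
-- ===== Notes on version B (the rewrite author's own statement) =====
-- stated objective: alternative
-- what changed: Replaces A's nested per-house if-ladder with conditional keyword branches by a flat ordered rule list scanned first-match-wins, where each rule matches on (house, is_individual, optional any-of keyword set) uniformly and a missed scan yields the 'The Throne' fallback.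
import Mathlib
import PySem

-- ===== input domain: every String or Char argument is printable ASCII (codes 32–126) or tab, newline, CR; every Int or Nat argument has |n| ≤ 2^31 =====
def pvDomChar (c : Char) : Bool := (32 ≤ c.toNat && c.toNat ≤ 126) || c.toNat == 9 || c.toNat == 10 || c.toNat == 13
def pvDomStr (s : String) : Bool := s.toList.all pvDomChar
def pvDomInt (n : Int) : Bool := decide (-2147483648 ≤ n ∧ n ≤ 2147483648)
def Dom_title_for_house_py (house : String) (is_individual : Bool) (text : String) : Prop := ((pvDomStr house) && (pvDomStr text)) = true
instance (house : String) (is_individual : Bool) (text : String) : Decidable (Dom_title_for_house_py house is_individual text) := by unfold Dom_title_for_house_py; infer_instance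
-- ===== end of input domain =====

-- B replaces A's nested if-ladder by a flat ordered rule list scanned
-- first-match-wins, with the keyword condition folded into rule matching
-- (objective: alternative); same return value everywhere.

-- ===== PORT A =====
def title_for_house_py (house : String) (is_individual : Bool) (text : String) : String :=
  let text_lower := PySem.Str.lower text
  if house == "High House War" then
    if is_individual then
      if ["assassin", "covert", "killed", "targeted"].any (fun w => PySem.Str.isIn w text_lower)
      then "The Assassin" else "The Warlord"
    else "The Army"
  else if house == "High House Coin" then
    if is_individual then "The Merchant"
    else if ["central bank", "federal reserve", "imf", "world bank"].any (fun w => PySem.Str.isIn w text_lower)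
    then "The Throne" else "The King"
  else if house == "High House Shadow" then
    if is_individual then "The Assassin"
    else if ["disinformation", "propaganda", "influence", "narrative"].any (fun w => PySem.Str.isIn w text_lower)
    then "The Weaver" else "The Knight"
  else if house == "High House Life" then
    if is_individual then "The Magi" else "The King"
  else if house == "High House Iron" then
    if is_individual then "The Magi" else "The Merchant"
  else if house == "High House Words" then
    if is_individual then "The Herald" else "The Weaver"
  else if house == "High House Chains" then
    if is_individual then "The Assassin" else "The Knight"
  else "The Throne"

-- ===== PORT B =====
-- a rule: (house, is_individual, any-of-these-keywords (none = unconditional), title)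
def pvRules : List (String × Bool × Option (List String) × String) :=
  [ ("High House War", true, some ["assassin", "covert", "killed", "targeted"], "The Assassin"),
    ("High House War", true, none, "The Warlord"),
    ("High House War", false, none, "The Army"),
    ("High House Coin", true, none, "The Merchant"),
    ("High House Coin", false, some ["central bank", "federal reserve", "imf", "world bank"], "The Throne"),
    ("High House Coin", false, none, "The King"),
    ("High House Shadow", true, none, "The Assassin"),
    ("High House Shadow", false, some ["disinformation", "propaganda", "influence", "narrative"], "The Weaver"),
    ("High House Shadow", false, none, "The Knight"),
    ("High House Life", true, none, "The Magi"),
    ("High House Life", false, none, "The King"),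
    ("High House Iron", true, none, "The Magi"),
    ("High House Iron", false, none, "The Merchant"),
    ("High House Words", true, none, "The Herald"),
    ("High House Words", false, none, "The Weaver"),
    ("High House Chains", true, none, "The Assassin"),
    ("High House Chains", false, none, "The Knight") ]

-- first-match scan of the rule list (the 'for' loop of Source B)
def pvScanRules (house : String) (is_individual : Bool) (text_lower : String) :
    List (String × Bool × Option (List String) × String) → String
  | [] => "The Throne"
  | (rh, rf, kws, title) :: rest =>
      if rh == house && rf == is_individual &&
         (match kws with
          | none => true
          | some ws => ws.any (fun w => PySem.Str.isIn w text_lower))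
      then title
      else pvScanRules house is_individual text_lower rest

def title_for_house_py_alt (house : String) (is_individual : Bool) (text : String) : String :=
  let text_lower := PySem.Str.lower text
  pvScanRules house is_individual text_lower pvRules

-- ===== PRECONDITION & SPEC =====
def Spec_title_for_house_py (house : String) (is_individual : Bool) (text : String) (out : String) : Prop := out = title_for_house_py_alt house is_individual text
instance (house : String) (is_individual : Bool) (text : String) (out : String) : Decidable (Spec_title_for_house_py house is_individual text out) := by unfold Spec_title_for_house_py; infer_instance

-- ===== CLAIM (what is proved, stated in full; the proofs are below) =====
def Claim_equal_title_for_house_py : Prop := ∀ (house : String) (is_individual : Bool) (text : String), Dom_title_for_house_py house is_individual text → Spec_title_for_house_py house is_individual text (title_for_house_py house is_individual text)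

-- ===== LEMMAS AND PROOFS =====

-- ===== VERDICT (by name: the statement is the Claim_ definition above) =====
theorem title_for_house_py_spec : Claim_equal_title_for_house_py := by
  intro house is_individual text _
  show title_for_house_py house is_individual text = title_for_house_py_alt house is_individual text
  unfold title_for_house_py title_for_house_py_alt pvRules
  by_cases h1 : house = "High House War"
  · subst h1; cases is_individual <;> simp [pvScanRules]
  by_cases h2 : house = "High House Coin"
  · subst h2; cases is_individual <;> simp [pvScanRules]
  by_cases h3 : house = "High House Shadow"
  · subst h3; cases is_individual <;> simp [pvScanRules]
  by_cases h4 : house = "High House Life"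
  · subst h4; cases is_individual <;> simp [pvScanRules]
  by_cases h5 : house = "High House Iron"
  · subst h5; cases is_individual <;> simp [pvScanRules]
  by_cases h6 : house = "High House Words"
  · subst h6; cases is_individual <;> simp [pvScanRules]
  by_cases h7 : house = "High House Chains"
  · subst h7; cases is_individual <;> simp [pvScanRules]
  simp [pvScanRules, Ne.symm h1, Ne.symm h2, Ne.symm h3, Ne.symm h4, Ne.symm h5, Ne.symm h6, Ne.symm h7, h1, h2, h3, h4, h5, h6, h7]
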